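-- pv_equiv track=rewrite | github.com/florencevanderhoven/Agenda | fix_ics_timezone.py | ensure_calendar_headers
-- ===== SOURCE A (Python) =====
-- TZID = "Europe/Amsterdam"
--
-- def ensure_calendar_headers(lines: list[str]) -> list[str]:
--     """
--     Zorg dat X-WR-TIMEZONE in VCALENDAR staat (Google gebruikt dit).
--     """
--     out = []
--     inserted = False
--     for line in lines:
--         out.append(line)
--         if not inserted and line.strip() == "BEGIN:VCALENDAR":
--             out.append(f"X-WR-TIMEZONE:{TZID}")
--             inserted = True
--     return out
-- ===== SOURCE B (Python) =====
-- TZID = "Europe/Amsterdam"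
--
-- def ensure_calendar_headers(lines: list[str]) -> list[str]:
--     """
--     Zorg dat X-WR-TIMEZONE in VCALENDAR staat (Google gebruikt dit).
--     """
--     for i, line in enumerate(lines):
--         if line.strip() == "BEGIN:VCALENDAR":
--             return lines[:i + 1] + [f"X-WR-TIMEZONE:{TZID}"] + lines[i + 1:]
--     return list(lines)
-- ===== Notes on version B (the rewrite author's own statement) =====
-- stated objective: simpler
-- what changed: Replaces the accumulate-with-inserted-flag loop by locating the first 'BEGIN:VCALENDAR' line and building the result with one slice splice (copy of the input when no marker exists).
import Mathlib
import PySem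

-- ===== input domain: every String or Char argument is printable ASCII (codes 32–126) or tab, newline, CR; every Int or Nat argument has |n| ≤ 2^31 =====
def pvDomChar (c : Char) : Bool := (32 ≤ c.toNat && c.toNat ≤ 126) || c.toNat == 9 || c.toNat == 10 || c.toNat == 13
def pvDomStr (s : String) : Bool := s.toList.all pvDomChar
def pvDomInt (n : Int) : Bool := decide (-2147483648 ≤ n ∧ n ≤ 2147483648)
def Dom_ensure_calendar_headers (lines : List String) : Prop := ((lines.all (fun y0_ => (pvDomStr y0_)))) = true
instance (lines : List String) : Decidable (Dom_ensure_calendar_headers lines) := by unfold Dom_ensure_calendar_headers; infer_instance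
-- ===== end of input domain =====

-- B replaces A's accumulate-with-flag loop by locate-then-splice: same result, simpler decomposition.
-- ===== PORT A =====
-- the loop body of A (appends the line; inserts the header after the first marker)
def ecStep (st : List String × Bool) (line : String) : List String × Bool :=
  let out := st.1 ++ [line]
  if !st.2 && (PySem.Str.strip line == "BEGIN:VCALENDAR") then
    (out ++ ["X-WR-TIMEZONE:Europe/Amsterdam"], true)
  else (out, st.2)

def ensure_calendar_headers (lines : List String) : List String :=
  (lines.foldl ecStep (([] : List String), false)).1

-- ===== PORT B =====
-- the `for i, line in enumerate(lines)` scan with early return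
def ecFind : List String → Nat → Option Nat
  | [], _ => none
  | l :: ls, i => if PySem.Str.strip l == "BEGIN:VCALENDAR" then some i else ecFind ls (i + 1)

def ensure_calendar_headers_alt (lines : List String) : List String :=
  match ecFind lines 0 with
  | some i => lines.take (i + 1) ++ ["X-WR-TIMEZONE:Europe/Amsterdam"] ++ lines.drop (i + 1)
  | none => lines

-- ===== PRECONDITION & SPEC =====
def Spec_ensure_calendar_headers (lines : List String) (out : List String) : Prop := out = ensure_calendar_headers_alt lines
instance (lines : List String) (out : List String) : Decidable (Spec_ensure_calendar_headers lines out) := by unfold Spec_ensure_calendar_headers; infer_instance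

-- ===== CLAIM (what is proved, stated in full; the proofs are below) =====
def Claim_equal_ensure_calendar_headers : Prop := ∀ (lines : List String), Dom_ensure_calendar_headers lines → Spec_ensure_calendar_headers lines (ensure_calendar_headers lines)

-- ===== LEMMAS AND PROOFS =====

theorem ecFind_shift (ls : List String) (n : Nat) :
    ecFind ls n = (ecFind ls 0).map (· + n) := by
  induction ls generalizing n with
  | nil => simp [ecFind]
  | cons l ls ih =>
    simp only [ecFind]
    split
    · simp
    · rw [ih (n + 1), ih (0 + 1)]
      cases ecFind ls 0 <;> simp
      omega

theorem alt_cons (l : String) (ls : List String) :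
    ensure_calendar_headers_alt (l :: ls) =
      if PySem.Str.strip l == "BEGIN:VCALENDAR" then
        l :: "X-WR-TIMEZONE:Europe/Amsterdam" :: ls
      else l :: ensure_calendar_headers_alt ls := by
  by_cases h : (PySem.Str.strip l == "BEGIN:VCALENDAR") = true
  · simp [ensure_calendar_headers_alt, ecFind, h]
  · simp only [ensure_calendar_headers_alt, ecFind, h, if_false, Bool.false_eq_true]
    rw [ecFind_shift ls (0 + 1)]
    cases ecFind ls 0 <;> simp [List.take_succ_cons, List.drop_succ_cons]

theorem ecStep_true (out : List String) (l : String) :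
    ecStep (out, true) l = (out ++ [l], true) := by simp [ecStep]

theorem foldl_true (ls out : List String) :
    (ls.foldl ecStep (out, true)).1 = out ++ ls := by
  induction ls generalizing out with
  | nil => simp
  | cons l ls ih => rw [List.foldl_cons, ecStep_true, ih]; simp

theorem foldl_false (ls out : List String) :
    (ls.foldl ecStep (out, false)).1 = out ++ ensure_calendar_headers_alt ls := by
  induction ls generalizing out with
  | nil => simp [ensure_calendar_headers_alt, ecFind]
  | cons l ls ih =>
    rw [alt_cons, List.foldl_cons]
    by_cases h : (PySem.Str.strip l == "BEGIN:VCALENDAR") = true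
    · rw [show ecStep (out, false) l = (out ++ [l, "X-WR-TIMEZONE:Europe/Amsterdam"], true) from by
        simp [ecStep, h], foldl_true]
      simp [h]
    · rw [show ecStep (out, false) l = (out ++ [l], false) from by simp [ecStep, h], ih]
      simp [h]

-- ===== VERDICT (by name: the statement is the Claim_ definition above) =====
theorem ensure_calendar_headers_spec : Claim_equal_ensure_calendar_headers := by
  intro lines _
  unfold Spec_ensure_calendar_headers ensure_calendar_headers
  simpa using foldl_false lines []
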